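-- pv_equiv track=rewrite | github.com/dj-lumiere/problem-solving-boj | 백준/Unrated/33667. 루미의 28번째 생일/루미의 28번째 생일.py | to_seconds
-- ===== SOURCE A (Python) =====
-- MINUTE_SECONDS = 60
--
-- HOUR_SECONDS = 60 * MINUTE_SECONDS
--
-- DAY_SECONDS = 24 * HOUR_SECONDS
--
-- def is_leap_year(year):
--     return (year % 4 == 0 and year % 100 != 0) or (year % 400 == 0)
--
-- def days_in_month(year, month):
--     if is_leap_year(year) and month == 2:
--         return 29
--     month_table = [0, 31, 28, 31, 30, 31, 30, 31, 31, 30, 31, 30, 31]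
--     return month_table[month]
--
-- def to_seconds(y, m, d, h, minute, s):
--     total_seconds = 0
--     leap_year_count = (y - 1) // 4 - (y - 1) // 100 + (y - 1) // 400
--     total_seconds += (365 * (y - 1) + leap_year_count) * DAY_SECONDS
--     for month in range(1, m):
--         total_seconds += days_in_month(y, month) * DAY_SECONDS
--     total_seconds += (d - 1) * DAY_SECONDS
--     total_seconds += h * HOUR_SECONDS
--     total_seconds += minute * MINUTE_SECONDS
--     total_seconds += s
--     return total_seconds
-- ===== SOURCE B (Python) =====
-- MINUTE_SECONDS = 60
--
-- HOUR_SECONDS = 60 * MINUTE_SECONDS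
--
-- DAY_SECONDS = 24 * HOUR_SECONDS
--
-- def is_leap_year(year):
--     return (year % 4 == 0 and year % 100 != 0) or (year % 400 == 0)
--
-- # cumulative days before month m in a non-leap year (index m; indices 0 and 1 are 0)
-- CUM_DAYS = [0, 0, 31, 59, 90, 120, 151, 181, 212, 243, 273, 304, 334, 365]
--
-- def to_seconds(y, m, d, h, minute, s):
--     prev = y - 1
--     days = 365 * prev + prev // 4 - prev // 100 + prev // 400 + (d - 1)
--     if m >= 2:
--         days += CUM_DAYS[m]
--         if m > 2 and is_leap_year(y):
--             days += 1
--     return days * DAY_SECONDS + h * HOUR_SECONDS + minute * MINUTE_SECONDS + s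
-- ===== Notes on version B (the rewrite author's own statement) =====
-- stated objective: simpler
-- what changed: Replaced the per-month loop over days_in_month with a single lookup in a precomputed cumulative-days table plus a leap-day correction for m > 2.
import Mathlib
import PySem

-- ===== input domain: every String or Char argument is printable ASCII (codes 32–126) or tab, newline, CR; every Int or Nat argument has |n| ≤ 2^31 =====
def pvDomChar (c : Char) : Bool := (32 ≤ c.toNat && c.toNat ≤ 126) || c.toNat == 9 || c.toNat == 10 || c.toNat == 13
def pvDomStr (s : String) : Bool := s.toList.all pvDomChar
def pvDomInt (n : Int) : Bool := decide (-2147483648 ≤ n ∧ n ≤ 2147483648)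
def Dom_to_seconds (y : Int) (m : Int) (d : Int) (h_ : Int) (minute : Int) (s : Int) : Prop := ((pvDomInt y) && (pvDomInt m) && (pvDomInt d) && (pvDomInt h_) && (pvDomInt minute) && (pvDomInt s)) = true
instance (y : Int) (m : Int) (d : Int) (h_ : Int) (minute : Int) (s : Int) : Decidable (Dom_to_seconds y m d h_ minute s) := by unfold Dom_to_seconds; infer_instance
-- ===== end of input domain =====

-- B replaces A's month loop by one cumulative-days table lookup (objective: simpler).

-- ===== PORT A =====
def MINUTE_SECONDS : Int := 60
def HOUR_SECONDS : Int := 60 * MINUTE_SECONDS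
def DAY_SECONDS : Int := 24 * HOUR_SECONDS

def is_leap_year (year : Int) : Bool :=
  (PySem.Int.mod year 4 == 0 && PySem.Int.mod year 100 != 0) || (PySem.Int.mod year 400 == 0)

def month_table : List Int := [0, 31, 28, 31, 30, 31, 30, 31, 31, 30, 31, 30, 31]

-- month_table[month]: .getD 0 is unreachable inside Pre_ (the loop only reaches months 1..12)
def days_in_month (year : Int) (month : Int) : Int :=
  if is_leap_year year && month == 2 then 29
  else (PySem.List.pyGet? month_table month).getD 0

def to_seconds (y : Int) (m : Int) (d : Int) (h_ : Int) (minute : Int) (s : Int) : Int :=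
  let leap_year_count := PySem.Int.floordiv (y - 1) 4 - PySem.Int.floordiv (y - 1) 100 + PySem.Int.floordiv (y - 1) 400
  let total := 0 + (365 * (y - 1) + leap_year_count) * DAY_SECONDS
  let total := (PySem.List.pyRange 1 m 1).foldl (fun acc month => acc + days_in_month y month * DAY_SECONDS) total
  let total := total + (d - 1) * DAY_SECONDS
  let total := total + h_ * HOUR_SECONDS
  let total := total + minute * MINUTE_SECONDS
  total + s

-- ===== PORT B =====
def CUM_DAYS : List Int := [0, 0, 31, 59, 90, 120, 151, 181, 212, 243, 273, 304, 334, 365]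

def to_seconds_alt (y : Int) (m : Int) (d : Int) (h_ : Int) (minute : Int) (s : Int) : Int :=
  let prev := y - 1
  let days := 365 * prev + PySem.Int.floordiv prev 4 - PySem.Int.floordiv prev 100 + PySem.Int.floordiv prev 400 + (d - 1)
  -- CUM_DAYS[m]: .getD 0 is unreachable inside Pre_ (2 ≤ m ≤ 13 there)
  let days := if m ≥ 2 then
      let days := days + (PySem.List.pyGet? CUM_DAYS m).getD 0
      if m > 2 && is_leap_year y then days + 1 else days
    else days
  days * DAY_SECONDS + h_ * HOUR_SECONDS + minute * MINUTE_SECONDS + s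

-- ===== PRECONDITION & SPEC =====
-- Pre_ excludes m ≥ 14, where both A and B raise IndexError on a month-table lookup.
def Pre_to_seconds (y : Int) (m : Int) (d : Int) (h_ : Int) (minute : Int) (s : Int) : Prop := m ≤ 13
instance (y : Int) (m : Int) (d : Int) (h_ : Int) (minute : Int) (s : Int) : Decidable (Pre_to_seconds y m d h_ minute s) := by unfold Pre_to_seconds; infer_instance

def pvWitness_to_seconds : Int × Int × Int × Int × Int × Int := (2024, 3, 1, 0, 0, 0)

def Spec_to_seconds (y : Int) (m : Int) (d : Int) (h_ : Int) (minute : Int) (s : Int) (out : Int) : Prop := out = to_seconds_alt y m d h_ minute s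
instance (y : Int) (m : Int) (d : Int) (h_ : Int) (minute : Int) (s : Int) (out : Int) : Decidable (Spec_to_seconds y m d h_ minute s out) := by unfold Spec_to_seconds; infer_instance

-- ===== CLAIM (what is proved, stated in full; the proofs are below) =====
def Claim_equal_to_seconds : Prop := ∀ (y : Int) (m : Int) (d : Int) (h_ : Int) (minute : Int) (s : Int), Dom_to_seconds y m d h_ minute s → Pre_to_seconds y m d h_ minute s → Spec_to_seconds y m d h_ minute s (to_seconds y m d h_ minute s)

-- ===== LEMMAS AND PROOFS =====

-- ===== VERDICT (by name: the statement is the Claim_ definition above) =====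
theorem to_seconds_spec : Claim_equal_to_seconds := by
  intro y m d h_ minute s _ hpre
  unfold Spec_to_seconds to_seconds to_seconds_alt Pre_to_seconds at *
  by_cases hm : m ≤ 1
  · rw [PySem.List.pyRange_one_eq_nil hm]
    simp only [List.foldl_nil, if_neg (by omega : ¬ m ≥ 2)]
    ring
  · have h2 : 2 ≤ m := by omega
    interval_cases m <;> cases hly : is_leap_year y <;>
      simp [PySem.List.pyRange, List.range_succ, days_in_month, hly, month_table, CUM_DAYS,
            PySem.List.pyGet?, PySem.List.pyIdx?] <;> ring
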